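-- pv_equiv track=rewrite | github.com/xyxare/binah | binah/binah/api/utils/other.py | order_corners
-- ===== SOURCE A (Python) =====
-- def order_corners(points):
--     """Order corners from points"""
--     if not points or len(points) < 4:
--         return "Insufficient points to form a shape"
--
--     top_left = points[0]
--     top_right = points[0]
--     bottom_left = points[0]
--     bottom_right = points[0]
--     min_sum = points[0][0] + points[0][1]
--     max_sum = points[0][0] + points[0][1]
--     min_diff = points[0][0] - points[0][1]
--     max_diff = points[0][0] - points[0][1]
--
--     for point in points:
--         points_sum = point[0] + point[1]
--         points_diff = point[0] - point[1]
--
--         if points_sum < min_sum: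
--             min_sum = points_sum
--             top_left = point
--         if points_sum > max_sum:
--             max_sum = points_sum
--             bottom_right = point
--
--         if points_diff < min_diff:
--             min_diff = points_diff
--             bottom_left = point
--         if points_diff > max_diff:
--             max_diff = points_diff
--             top_right = point
--
--     return top_left, bottom_left, top_right, bottom_right
-- ===== SOURCE B (Python) =====
-- def order_corners(points):
--     """Order corners from points"""
--     if not points or len(points) < 4:
--         return "Insufficient points to form a shape"
--     top_left = sorted(points, key=lambda p: p[0] + p[1])[0]
--     bottom_right = sorted(points, key=lambda p: p[0] + p[1], reverse=True)[0]
--     bottom_left = sorted(points, key=lambda p: p[0] - p[1])[0]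
--     top_right = sorted(points, key=lambda p: p[0] - p[1], reverse=True)[0]
--     return top_left, bottom_left, top_right, bottom_right
-- ===== Notes on version B (the rewrite author's own statement) =====
-- stated objective: alternative
-- what changed: Replaces the fused extrema-tracking loop over eight state variables with four stable sorts (by coordinate sum/difference, ascending and descending) whose first element is each corner; stability of sorted preserves A's first-occurrence tie-breaking.
import Mathlib
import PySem

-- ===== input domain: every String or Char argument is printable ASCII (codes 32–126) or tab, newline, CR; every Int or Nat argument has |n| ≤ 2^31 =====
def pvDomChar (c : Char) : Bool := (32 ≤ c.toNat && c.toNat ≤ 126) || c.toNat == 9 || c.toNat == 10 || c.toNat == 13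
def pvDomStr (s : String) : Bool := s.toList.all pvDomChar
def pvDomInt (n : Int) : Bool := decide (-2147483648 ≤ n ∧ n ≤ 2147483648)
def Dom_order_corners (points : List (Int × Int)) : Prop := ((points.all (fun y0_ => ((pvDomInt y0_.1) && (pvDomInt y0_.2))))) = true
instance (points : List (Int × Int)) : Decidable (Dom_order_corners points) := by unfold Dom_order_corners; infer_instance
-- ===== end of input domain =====

-- B replaces A's fused extrema-tracking loop (eight state variables) with four stable
-- sorts whose first element is each corner (objective: alternative algorithm, not faster).

-- ===== PORT A =====
-- A's loop state: (top_left, top_right, bottom_left, bottom_right, min_sum, max_sum, min_diff, max_diff)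
def ordACstep (st : (Int × Int) × (Int × Int) × (Int × Int) × (Int × Int) × Int × Int × Int × Int)
    (p : Int × Int) : (Int × Int) × (Int × Int) × (Int × Int) × (Int × Int) × Int × Int × Int × Int :=
  let (tl, tr, bl, br, minS, maxS, minD, maxD) := st
  let s := p.1 + p.2
  let d := p.1 - p.2
  let (minS, tl) := if s < minS then (s, p) else (minS, tl)
  let (maxS, br) := if maxS < s then (s, p) else (maxS, br)
  let (minD, bl) := if d < minD then (d, p) else (minD, bl)
  let (maxD, tr) := if maxD < d then (d, p) else (maxD, tr)
  (tl, tr, bl, br, minS, maxS, minD, maxD)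

def order_corners (points : List (Int × Int)) : (Int × Int) × (Int × Int) × (Int × Int) × (Int × Int) :=
  match points with
  | [] => ((0, 0), (0, 0), (0, 0), (0, 0))   -- unreachable under Pre_ (Python returns a string there)
  | p0 :: _ =>
    let st := points.foldl ordACstep
      (p0, p0, p0, p0, p0.1 + p0.2, p0.1 + p0.2, p0.1 - p0.2, p0.1 - p0.2)
    (st.1, st.2.2.1, st.2.1, st.2.2.2.1)   -- (top_left, bottom_left, top_right, bottom_right)

-- ===== PORT B =====
-- sorted(points, key=…[, reverse=True])[0]; index 0 of a list (IndexError → none, unreachable under Pre_)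
def ordBfirst (l : List (Int × Int)) : Int × Int :=
  match PySem.List.pyGet? l 0 with
  | some v => v
  | none => (0, 0)   -- unreachable under Pre_

def order_corners_alt (points : List (Int × Int)) : (Int × Int) × (Int × Int) × (Int × Int) × (Int × Int) :=
  let top_left := ordBfirst (PySem.List.sorted points (fun p => p.1 + p.2))
  let bottom_right := ordBfirst (PySem.List.sorted points (fun p => p.1 + p.2) true)
  let bottom_left := ordBfirst (PySem.List.sorted points (fun p => p.1 - p.2))
  let top_right := ordBfirst (PySem.List.sorted points (fun p => p.1 - p.2) true)
  (top_left, bottom_left, top_right, bottom_right)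

-- ===== PRECONDITION & SPEC =====
-- Pre_ excludes points lists of length < 4: there Python A returns the string
-- "Insufficient points to form a shape", which is not a value of the declared tuple type.
def Pre_order_corners (points : List (Int × Int)) : Prop := 4 ≤ points.length
instance (points : List (Int × Int)) : Decidable (Pre_order_corners points) := by unfold Pre_order_corners; infer_instance
def pvWitness_order_corners : (List (Int × Int)) := [(0, 0), (3, 0), (3, 2), (0, 2)]

def Spec_order_corners (points : List (Int × Int)) (out : (Int × Int) × (Int × Int) × (Int × Int) × (Int × Int)) : Prop := out = order_corners_alt points
instance (points : List (Int × Int)) (out : (Int × Int) × (Int × Int) × (Int × Int) × (Int × Int)) : Decidable (Spec_order_corners points out) := by unfold Spec_order_corners; infer_instance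

-- ===== CLAIM (what is proved, stated in full; the proofs are below) =====
def Claim_equal_order_corners : Prop := ∀ (points : List (Int × Int)), Dom_order_corners points → Pre_order_corners points → Spec_order_corners points (order_corners points)

-- ===== LEMMAS AND PROOFS =====

-- the first-extremal folds both programs reduce to
def minF (key : Int × Int → Int) (a : Int × Int) (l : List (Int × Int)) : Int × Int :=
  l.foldl (fun m p => if key p < key m then p else m) a
def maxF (key : Int × Int → Int) (a : Int × Int) (l : List (Int × Int)) : Int × Int :=
  l.foldl (fun m p => if key m < key p then p else m) a

-- one step of A's fused loop keeps the cached extrema equal to the keys of the tracked points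
lemma ordACstep_inv (tl tr bl br p : Int × Int) :
    ordACstep (tl, tr, bl, br, tl.1 + tl.2, br.1 + br.2, bl.1 - bl.2, tr.1 - tr.2) p
      = ((if p.1 + p.2 < tl.1 + tl.2 then p else tl),
         (if tr.1 - tr.2 < p.1 - p.2 then p else tr),
         (if p.1 - p.2 < bl.1 - bl.2 then p else bl),
         (if br.1 + br.2 < p.1 + p.2 then p else br),
         (if p.1 + p.2 < tl.1 + tl.2 then p else tl).1 + (if p.1 + p.2 < tl.1 + tl.2 then p else tl).2,
         (if br.1 + br.2 < p.1 + p.2 then p else br).1 + (if br.1 + br.2 < p.1 + p.2 then p else br).2,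
         (if p.1 - p.2 < bl.1 - bl.2 then p else bl).1 - (if p.1 - p.2 < bl.1 - bl.2 then p else bl).2,
         (if tr.1 - tr.2 < p.1 - p.2 then p else tr).1 - (if tr.1 - tr.2 < p.1 - p.2 then p else tr).2) := by
  simp only [ordACstep]
  split_ifs <;> simp

-- A's fused fold splits into the four independent first-extremal folds
lemma foldA_split (l : List (Int × Int)) (tl tr bl br : Int × Int) :
    l.foldl ordACstep (tl, tr, bl, br, tl.1 + tl.2, br.1 + br.2, bl.1 - bl.2, tr.1 - tr.2)
      = (minF (fun p => p.1 + p.2) tl l, maxF (fun p => p.1 - p.2) tr l,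
         minF (fun p => p.1 - p.2) bl l, maxF (fun p => p.1 + p.2) br l,
         (minF (fun p => p.1 + p.2) tl l).1 + (minF (fun p => p.1 + p.2) tl l).2,
         (maxF (fun p => p.1 + p.2) br l).1 + (maxF (fun p => p.1 + p.2) br l).2,
         (minF (fun p => p.1 - p.2) bl l).1 - (minF (fun p => p.1 - p.2) bl l).2,
         (maxF (fun p => p.1 - p.2) tr l).1 - (maxF (fun p => p.1 - p.2) tr l).2) := by
  induction l generalizing tl tr bl br with
  | nil => simp [minF, maxF]
  | cons p t ih =>
    rw [List.foldl_cons, ordACstep_inv]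
    rw [ih]
    simp only [minF, maxF, List.foldl_cons]

-- the head of insertBy depends only on the old head
lemma head?_foldl_insertBy (before : (Int × Int) → (Int × Int) → Bool)
    (l : List (Int × Int)) (h : Int × Int) (t : List (Int × Int)) :
    (l.foldl (fun acc x => PySem.List.insertBy before x acc) (h :: t)).head?
      = some (l.foldl (fun m x => if before x m then x else m) h) := by
  induction l generalizing h t with
  | nil => rfl
  | cons x l ih =>
    simp only [List.foldl_cons, PySem.List.insertBy]
    by_cases hb : before x h
    · simp only [hb, if_true]
      exact ih x (h :: t)
    · simp only [hb, if_false, Bool.false_eq_true]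
      exact ih h _

-- head of a stable ascending sort = the first minimal element (A's strict-< tracking)
lemma head?_sorted_min (p : Int × Int) (t : List (Int × Int)) (key : Int × Int → Int) :
    (PySem.List.sorted (p :: t) key).head? = some (minF key p t) := by
  rw [PySem.List.sorted_eq_foldl_insertBy]
  simp only [List.foldl_cons, PySem.List.insertBy]
  rw [head?_foldl_insertBy]
  simp only [minF]
  simp only [decide_eq_true_eq]

-- head of a stable descending sort = the first maximal element
lemma head?_sorted_max (p : Int × Int) (t : List (Int × Int)) (key : Int × Int → Int) :
    (PySem.List.sorted (p :: t) key true).head? = some (maxF key p t) := by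
  show (List.foldl (fun acc x => PySem.List.insertBy (fun a b => decide (key b < key a)) x acc) [] (p :: t)).head? = _
  simp only [List.foldl_cons, PySem.List.insertBy]
  rw [head?_foldl_insertBy]
  simp only [maxF]
  simp only [decide_eq_true_eq]

lemma ordBfirst_head (l : List (Int × Int)) (v : Int × Int) (hv : l.head? = some v) :
    ordBfirst l = v := by
  cases l with
  | nil => simp at hv
  | cons a t =>
    simp at hv
    simp [ordBfirst, PySem.List.pyGet?, PySem.List.pyIdx?, hv]

-- ===== VERDICT (by name: the statement is the Claim_ definition above) =====
theorem order_corners_spec : Claim_equal_order_corners := by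
  intro points _ hpre
  match points, hpre with
  | p0 :: t, _ =>
    show order_corners (p0 :: t) = order_corners_alt (p0 :: t)
    unfold order_corners order_corners_alt
    simp only [List.foldl_cons]
    have h0 : ordACstep (p0, p0, p0, p0, p0.1 + p0.2, p0.1 + p0.2, p0.1 - p0.2, p0.1 - p0.2) p0
        = (p0, p0, p0, p0, p0.1 + p0.2, p0.1 + p0.2, p0.1 - p0.2, p0.1 - p0.2) := by
      simp [ordACstep]
    rw [h0, foldA_split]
    rw [ordBfirst_head _ _ (head?_sorted_min p0 t _),
        ordBfirst_head _ _ (head?_sorted_max p0 t (fun p => p.1 + p.2)),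
        ordBfirst_head _ _ (head?_sorted_min p0 t (fun p => p.1 - p.2)),
        ordBfirst_head _ _ (head?_sorted_max p0 t (fun p => p.1 - p.2))]
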